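-- pv_equiv track=rewrite | github.com/alexey-goloburdin/obsidian-yaml-editor | main.py | find_yaml_block_indices
-- ===== SOURCE A (Python) =====
-- from typing import List, Tuple, Optional
--
-- def find_yaml_block_indices(content: str) -> Tuple[Optional[int], Optional[int]]:
--     """
--     Ищет в содержимом файла первый YAML-блок, определяемый как блок,
--     обрамлённый строками '---'.
--
--
--     :param content: Содержимое файла в виде строки.
--     :return: Кортеж (start_index, end_index), где start_index — индекс первой строки с '---',
--              а end_index — индекс следующей строки с '---'.
--              Если блок не найден, возвращается (None, None).
--     """
--     lines = content.splitlines()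
--
--     start_index = None
--     end_index = None
--
--     for idx, line in enumerate(lines):
--         if line.strip() == "---":
--             start_index = idx
--             break
--
--     if start_index is None:
--         return None, None
--
--     for idx in range(start_index + 1, len(lines)):
--         if lines[idx].strip() == "---":
--             end_index = idx
--             break
--
--     return start_index, end_index
-- ===== SOURCE B (Python) =====
-- def find_yaml_block_indices(content):
--     # Right-to-left fold: each matching line shifts the pair (s, e) -> (i, s),
--     # so after the fold s is the first '---' index and e the second (or None).
--     s = e = None
--     for i, line in reversed(list(enumerate(content.splitlines()))):
--         if line.strip() == "---":
--             s, e = i, s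
--     return s, e
-- ===== Notes on version B (the rewrite author's own statement) =====
-- stated objective: alternative
-- what changed: Replaces A's two staged early-breaking forward scans by a single right-to-left fold whose state pair shifts (s,e)->(i,s) at every '---' line, building the answer back-to-front.
import Mathlib
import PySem

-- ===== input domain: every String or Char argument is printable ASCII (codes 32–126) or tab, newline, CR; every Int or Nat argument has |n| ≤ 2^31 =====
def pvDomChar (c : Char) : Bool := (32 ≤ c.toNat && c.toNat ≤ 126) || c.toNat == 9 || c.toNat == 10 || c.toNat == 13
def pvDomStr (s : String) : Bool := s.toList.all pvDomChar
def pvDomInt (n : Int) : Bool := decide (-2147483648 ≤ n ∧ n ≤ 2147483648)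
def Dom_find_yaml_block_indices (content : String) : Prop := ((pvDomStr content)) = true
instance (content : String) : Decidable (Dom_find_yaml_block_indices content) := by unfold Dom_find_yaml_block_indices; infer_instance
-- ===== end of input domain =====

-- B replaces A's two staged early-breaking forward scans by one right-to-left fold whose state pair shifts (s,e)->(i,s) at each '---' line; same cost, different traversal.

-- ===== PORT A =====
-- first loop: 'for idx, line in enumerate(lines): if line.strip() == "---": start_index = idx; break'
def pvFindStart (lines : List String) (idx : Int) : Option Int :=
  match lines with
  | [] => none
  | l :: rest => if PySem.Str.strip l == "---" then some idx else pvFindStart rest (idx + 1)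

-- body of the second loop ('break' modelled by a kept Option accumulator)
def pvLoop2Body (lines : List String) (acc : Option Int) (idx : Int) : Option Int :=
  match acc with
  | some _ => acc
  | none => if PySem.Str.strip (PySem.List.pyGetD lines idx "") == "---" then some idx else none

def find_yaml_block_indices (content : String) : Option Int × Option Int :=
  let lines := PySem.Str.splitlines content
  match pvFindStart lines 0 with
  | none => (none, none)
  | some s =>
      let e := (PySem.List.pyRange (s + 1) (lines.length : Int) 1).foldl (pvLoop2Body lines) none
      (some s, e)

-- ===== PORT B =====
-- 'for i, line in reversed(list(enumerate(lines))): if line.strip() == "---": s, e = i, s'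
-- a Python loop over the reversed enumeration = foldr over the enumeration
def find_yaml_block_indices_alt (content : String) : Option Int × Option Int :=
  (PySem.List.enumerate (PySem.Str.splitlines content) 0).foldr
    (fun q st => if PySem.Str.strip q.2 == "---" then (some q.1, st.1) else st)
    ((none : Option Int), (none : Option Int))

-- ===== PRECONDITION & SPEC =====
def Spec_find_yaml_block_indices (content : String) (out : Option Int × Option Int) : Prop := out = find_yaml_block_indices_alt content
instance (content : String) (out : Option Int × Option Int) : Decidable (Spec_find_yaml_block_indices content out) := by unfold Spec_find_yaml_block_indices; infer_instance

-- ===== CLAIM (what is proved, stated in full; the proofs are below) =====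
def Claim_equal_find_yaml_block_indices : Prop := ∀ (content : String), Dom_find_yaml_block_indices content → Spec_find_yaml_block_indices content (find_yaml_block_indices content)

-- ===== LEMMAS AND PROOFS =====

-- the list of matching line indices (enumerating from k)
def pvMatches (lines : List String) (k : Int) : List Int :=
  ((PySem.List.enumerate lines k).filter (fun q => PySem.Str.strip q.2 == "---")).map (·.1)

theorem pvMatches_cons (l : String) (rest : List String) (k : Int) :
    pvMatches (l :: rest) k =
      if PySem.Str.strip l == "---" then k :: pvMatches rest (k + 1) else pvMatches rest (k + 1) := by
  simp only [pvMatches, PySem.List.enumerate_cons, List.filter_cons]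
  by_cases h : PySem.Str.strip l == "---" <;> simp [h]

-- A's first scan returns the head of the match list
theorem pvFindStart_eq_head? (lines : List String) : ∀ (k : Int),
    pvFindStart lines k = (pvMatches lines k).head? := by
  induction lines with
  | nil => intro k; rfl
  | cons l rest ih =>
    intro k
    rw [pvFindStart, pvMatches_cons]
    by_cases h : PySem.Str.strip l == "---" <;> simp [h, ih]

theorem pvFindStart_ge (lines : List String) : ∀ (k s : Int),
    pvFindStart lines k = some s → k ≤ s := by
  induction lines with
  | nil => intro k s h; simp [pvFindStart] at h
  | cons l rest ih =>
    intro k s h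
    rw [pvFindStart] at h
    by_cases hp : PySem.Str.strip l == "---"
    · simp [hp] at h; omega
    · simp [hp] at h; have := ih (k + 1) s h; omega

-- decomposition of the match list at the first match
theorem pvMatches_decomp (lines : List String) : ∀ (k s : Int),
    pvFindStart lines k = some s →
    pvMatches lines k = s :: pvMatches (lines.drop (s - k + 1).toNat) (s + 1) := by
  induction lines with
  | nil => intro k s h; simp [pvFindStart] at h
  | cons l rest ih =>
    intro k s h
    rw [pvFindStart] at h
    rw [pvMatches_cons]
    by_cases hp : PySem.Str.strip l == "---"
    · simp [hp] at h ⊢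
      subst h
      simp
    · simp [hp] at h ⊢
      have hks : k + 1 ≤ s := pvFindStart_ge rest (k + 1) s h
      have hdrop : (s - k + 1).toNat = (s - (k + 1) + 1).toNat + 1 := by omega
      rw [hdrop]
      simpa using ih (k + 1) s h

-- a kept Option accumulator stays put
theorem pvLoop2_keeps_some (lines : List String) (l : List Int) (v : Int) :
    l.foldl (pvLoop2Body lines) (some v) = some v := by
  induction l with
  | nil => rfl
  | cons x xs ih => simpa [pvLoop2Body] using ih

-- A's second scan is the first scan of the dropped suffix
theorem pvLoop2_eq_findStart (lines : List String) : ∀ (m : Nat) (a : Int), 0 ≤ a →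
    lines.length - a.toNat ≤ m →
    (PySem.List.pyRange a (lines.length : Int) 1).foldl (pvLoop2Body lines) none =
      pvFindStart (lines.drop a.toNat) a := by
  intro m
  induction m with
  | zero =>
    intro a ha hm
    have hlen : (lines.length : Int) ≤ a := by omega
    rw [PySem.List.pyRange_one_eq_nil hlen]
    have : lines.drop a.toNat = [] := List.drop_eq_nil_of_le (by omega)
    simp [this, pvFindStart]
  | succ m ih =>
    intro a ha hm
    by_cases hlt : a < (lines.length : Int)
    · have hn : a.toNat < lines.length := by omega
      rw [PySem.List.pyRange_one_cons hlt]
      rw [List.foldl_cons]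
      have hget : PySem.List.pyGetD lines a "" = lines[a.toNat] :=
        PySem.List.pyGetD_eq_getElem lines "" ha (by omega)
      have hdrop : lines.drop a.toNat = lines[a.toNat] :: lines.drop (a.toNat + 1) :=
        (List.getElem_cons_drop (as := lines) hn).symm
      rw [hdrop, pvFindStart]
      by_cases hp : PySem.Str.strip lines[a.toNat] == "---"
      · simp only [pvLoop2Body, hget, hp, if_true]
        rw [pvLoop2_keeps_some]
      · have h1 : (a + 1).toNat = a.toNat + 1 := by omega
        have hrec := ih (a + 1) (by omega) (by omega)
        rw [h1] at hrec
        simp only [pvLoop2Body, hget, hp, Bool.false_eq_true, if_false]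
        rw [hrec]
    · have hlen : (lines.length : Int) ≤ a := by omega
      rw [PySem.List.pyRange_one_eq_nil hlen]
      have : lines.drop a.toNat = [] := List.drop_eq_nil_of_le (by omega)
      simp [this, pvFindStart]

-- the result of A, expressed as a case split on the match list
theorem pvA_eq_match (lines : List String) :
    (match pvFindStart lines 0 with
      | none => ((none : Option Int), (none : Option Int))
      | some s => (some s, (PySem.List.pyRange (s + 1) (lines.length : Int) 1).foldl (pvLoop2Body lines) none)) =
    (match pvMatches lines 0 with
      | [] => ((none : Option Int), (none : Option Int))
      | [a] => (some a, none)
      | a :: b :: _ => (some a, some b)) := by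
  cases hfs : pvFindStart lines 0 with
  | none =>
    have hh : (pvMatches lines 0).head? = none := by rw [← pvFindStart_eq_head?, hfs]
    have hnil : pvMatches lines 0 = [] := by cases h : pvMatches lines 0 <;> simp_all
    rw [hnil]
  | some s =>
    have hs0 : (0 : Int) ≤ s := pvFindStart_ge lines 0 s hfs
    have hdec := pvMatches_decomp lines 0 s hfs
    have hdrop1 : (s - 0 + 1).toNat = (s + 1).toNat := by omega
    rw [hdrop1] at hdec
    have hloop := pvLoop2_eq_findStart lines lines.length (s + 1) (by omega) (by omega)
    rw [hdec]
    show (some s, (PySem.List.pyRange (s + 1) (lines.length : Int) 1).foldl (pvLoop2Body lines) none) = _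
    rw [hloop, pvFindStart_eq_head?]
    cases htl : pvMatches (lines.drop (s + 1).toNat) (s + 1) with
    | nil => simp
    | cons b rest => simp

-- B's right-to-left fold, expressed as the same case split on the match list
theorem pvB_eq_match (l : List (Int × String)) :
    l.foldr (fun q st => if PySem.Str.strip q.2 == "---" then (some q.1, st.1) else st)
        ((none : Option Int), (none : Option Int)) =
    (match (l.filter (fun q => PySem.Str.strip q.2 == "---")).map (·.1) with
      | [] => ((none : Option Int), (none : Option Int))
      | [a] => (some a, none)
      | a :: b :: _ => (some a, some b)) := by
  induction l with
  | nil => rfl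
  | cons q t ih =>
    rw [List.foldr_cons, List.filter_cons]
    by_cases hp : PySem.Str.strip q.2 == "---"
    · simp only [hp, if_true, ih]
      cases h : (t.filter (fun q => PySem.Str.strip q.2 == "---")).map (·.1) with
      | nil => simp [h]
      | cons a rest => cases rest <;> simp [h]
    · have hb : (PySem.Str.strip q.2 == "---") = false := by simpa using hp
      rw [hb]
      simp only [Bool.false_eq_true, if_false]
      exact ih

-- ===== VERDICT (by name: the statement is the Claim_ definition above) =====
theorem find_yaml_block_indices_spec : Claim_equal_find_yaml_block_indices := by
  intro content _
  show find_yaml_block_indices content = find_yaml_block_indices_alt content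
  rw [find_yaml_block_indices, find_yaml_block_indices_alt, pvB_eq_match]
  exact pvA_eq_match (PySem.Str.splitlines content)
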